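-- pv_equiv track=rewrite | github.com/edufmelo/Dados-de-Veiculos | main.py | estilo
-- ===== SOURCE A (Python) =====
-- def estilo(matriz):
--     suv = 0
--     hatch = 0
--     conversível = 0
--     wagon = 0
--     pickup = 0
--     sedan = 0
--     for i in range(len(matriz)):
--         if matriz[i][4] == 'suv':
--             suv += 1
--         elif matriz[i][4] == 'hatch':
--             hatch += 1
--         elif matriz[i][4] == 'conversível':
--             conversível += 1
--         elif matriz[i][4] == 'wagon':
--             wagon += 1
--         elif matriz[i][4] == 'pick-up':
--             pickup += 1
--         else:
--             sedan += 1
--     return suv, hatch, conversível, wagon, pickup, sedan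
-- ===== SOURCE B (Python) =====
-- def estilo(matriz):
--     col = [row[4] for row in matriz]
--     suv = col.count('suv')
--     hatch = col.count('hatch')
--     conversível = col.count('conversível')
--     wagon = col.count('wagon')
--     pickup = col.count('pick-up')
--     sedan = len(matriz) - (suv + hatch + conversível + wagon + pickup)
--     return suv, hatch, conversível, wagon, pickup, sedan
-- ===== Notes on version B (the rewrite author's own statement) =====
-- stated objective: simpler
-- what changed: Replaces the per-row if/elif cascade with 6 running accumulators by extracting the style column once and reading each named count with list.count, computing the catch-all sedan bucket by subtraction from len(matriz).
import Mathlib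
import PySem

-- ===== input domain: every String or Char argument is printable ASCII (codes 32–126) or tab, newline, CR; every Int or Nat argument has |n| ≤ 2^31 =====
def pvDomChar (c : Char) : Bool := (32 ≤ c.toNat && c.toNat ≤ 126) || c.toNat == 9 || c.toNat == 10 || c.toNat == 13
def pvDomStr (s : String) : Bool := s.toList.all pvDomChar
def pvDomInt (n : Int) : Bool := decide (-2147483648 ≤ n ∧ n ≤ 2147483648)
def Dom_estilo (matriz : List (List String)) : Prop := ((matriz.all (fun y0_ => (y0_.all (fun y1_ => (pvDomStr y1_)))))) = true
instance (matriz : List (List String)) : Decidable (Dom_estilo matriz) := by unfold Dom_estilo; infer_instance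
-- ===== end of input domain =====

-- B replaces A's six-accumulator if/elif loop by extracting the style column and
-- reading each count with list.count, with sedan obtained by subtraction (objective: simpler).

-- ===== PORT A =====
-- the body of A's if/elif cascade, one step of the loop
def estiloStep (acc : Int × Int × Int × Int × Int × Int) (s : String) : Int × Int × Int × Int × Int × Int :=
  let (suv, hatch, conv, wagon, pickup, sedan) := acc
  if s == "suv" then (suv + 1, hatch, conv, wagon, pickup, sedan)
  else if s == "hatch" then (suv, hatch + 1, conv, wagon, pickup, sedan)
  else if s == "conversível" then (suv, hatch, conv + 1, wagon, pickup, sedan)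
  else if s == "wagon" then (suv, hatch, conv, wagon + 1, pickup, sedan)
  else if s == "pick-up" then (suv, hatch, conv, wagon, pickup + 1, sedan)
  else (suv, hatch, conv, wagon, pickup, sedan + 1)

def estilo (matriz : List (List String)) : Int × Int × Int × Int × Int × Int :=
  (PySem.List.pyRange 0 (PySem.List.len matriz) 1).foldl
    (fun acc i => estiloStep acc (PySem.List.pyGetD (PySem.List.pyGetD matriz i []) 4 ""))
    (0, 0, 0, 0, 0, 0)

-- ===== PORT B =====
def estilo_alt (matriz : List (List String)) : Int × Int × Int × Int × Int × Int :=
  let col := matriz.map (fun row => PySem.List.pyGetD row 4 "")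
  let suv : Int := PySem.List.count col "suv"
  let hatch : Int := PySem.List.count col "hatch"
  let conv : Int := PySem.List.count col "conversível"
  let wagon : Int := PySem.List.count col "wagon"
  let pickup : Int := PySem.List.count col "pick-up"
  let sedan : Int := PySem.List.len matriz - (suv + hatch + conv + wagon + pickup)
  (suv, hatch, conv, wagon, pickup, sedan)

-- ===== PRECONDITION & SPEC =====
-- A raises IndexError on any row with fewer than 5 fields; exactly those inputs are excluded.
def Pre_estilo (matriz : List (List String)) : Prop := ∀ row ∈ matriz, 4 < row.length
instance (matriz : List (List String)) : Decidable (Pre_estilo matriz) := by unfold Pre_estilo; infer_instance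

def pvWitness_estilo : List (List String) := [["a", "b", "c", "d", "suv"], ["a", "b", "c", "d", "sedan"]]

def Spec_estilo (matriz : List (List String)) (out : Int × Int × Int × Int × Int × Int) : Prop := out = estilo_alt matriz
instance (matriz : List (List String)) (out : Int × Int × Int × Int × Int × Int) : Decidable (Spec_estilo matriz out) := by unfold Spec_estilo; infer_instance

-- ===== CLAIM (what is proved, stated in full; the proofs are below) =====
def Claim_equal_estilo : Prop := ∀ (matriz : List (List String)), Dom_estilo matriz → Pre_estilo matriz → Spec_estilo matriz (estilo matriz)

-- ===== LEMMAS AND PROOFS =====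
lemma estilo_loop (col : List String) (a b c d e f : Int) :
    col.foldl estiloStep (a, b, c, d, e, f) =
      (a + col.count "suv", b + col.count "hatch", c + col.count "conversível",
       d + col.count "wagon", e + col.count "pick-up",
       f + ((col.length : Int) - (col.count "suv" + col.count "hatch" + col.count "conversível"
              + col.count "wagon" + col.count "pick-up"))) := by
  induction col generalizing a b c d e f with
  | nil => simp
  | cons s t ih =>
    simp only [List.foldl_cons, estiloStep]
    split_ifs with h1 h2 h3 h4 h5 <;> rw [ih] <;> simp_all <;> omega

theorem estilo_spec : Claim_equal_estilo := by
  intro matriz _ _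
  unfold Spec_estilo estilo estilo_alt
  rw [PySem.List.foldl_pyRange_zero_pyGetD matriz []
      (fun acc row => estiloStep acc (PySem.List.pyGetD row 4 "")) (0, 0, 0, 0, 0, 0)]
  rw [← List.foldl_map]
  rw [estilo_loop]
  simp [PySem.List.count_eq, PySem.List.len]
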